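-- pv_equiv track=rewrite | github.com/heelaw/cyberteam | 00_cyberteam搭建/需要融合的对象/github/magic-master/backend/super-magic/app/utils/diff_generator.py | generate_match_locations_snippet
-- ===== SOURCE A (Python) =====
-- from typing import Optional, List, Tuple
--
-- def generate_match_locations_snippet(
--     content: str,
--     search_string: str,
--     max_matches: int = 10
-- ) -> Tuple[List[int], str]:
--     """
--     生成所有匹配位置的代码片段
--
--     Args:
--         content: 文件内容
--         search_string: 搜索字符串
--         max_matches: 最多显示的匹配数
--
--     Returns:
--         (行号列表, 格式化的匹配位置片段)
--     """
--     if not content or not search_string: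
--         return [], ""
--
--     lines = content.split('\n')
--     matches = []
--     line_numbers = []
--
--     # 查找所有匹配
--     for i, line in enumerate(lines):
--         if search_string in line:
--             line_num = i + 1
--             line_numbers.append(line_num)
--
--             if len(matches) < max_matches:
--                 # 获取匹配位置的上下文（前后各1行）
--                 snippet_lines = []
--
--                 # 前一行
--                 if i > 0:
--                     snippet_lines.append(f"  {i:4}|{lines[i-1][:100]}")
--
--                 # 匹配行（高亮）
--                 snippet_lines.append(f"> {line_num:4}|{line[:100]}")
--
--                 # 后一行
--                 if i < len(lines) - 1:
--                     snippet_lines.append(f"  {i+2:4}|{lines[i+1][:100]}")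
--
--                 matches.append('\n'.join(snippet_lines))
--
--     if not matches:
--         return [], ""
--
--     # 格式化输出
--     output = f"Found {len(line_numbers)} matches"
--     if len(line_numbers) > max_matches:
--         output += f" (showing first {max_matches})"
--     output += f" at lines: {', '.join(map(str, line_numbers[:20]))}"
--     if len(line_numbers) > 20:
--         output += f", ... and {len(line_numbers) - 20} more"
--     output += "\n\n"
--
--     output += "\n---\n".join(matches)
--
--     return line_numbers, output
-- ===== SOURCE B (Python) =====
-- def generate_match_locations_snippet(content, search_string, max_matches=10):
--     if not content or not search_string:
--         return [], ""
--     if '\n' in search_string: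
--         # a needle containing a newline can never occur inside a single line
--         return [], ""
--     # split the whole content by the needle: each boundary is one occurrence,
--     # and the line it sits on is the number of newlines seen before it
--     pieces = content.split(search_string)
--     idx = []
--     acc = 0
--     for piece in pieces[:-1]:
--         acc += piece.count('\n')
--         if not idx or idx[-1] != acc:
--             idx.append(acc)
--     if not idx or max_matches <= 0:
--         return [], ""
--     line_numbers = [i + 1 for i in idx]
--     lines = content.split('\n')
--     snippets = []
--     for i in idx[:max_matches]:
--         parts = []
--         if i > 0:
--             parts.append(f"  {i:4}|{lines[i-1][:100]}")
--         parts.append(f"> {i+1:4}|{lines[i][:100]}")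
--         if i < len(lines) - 1:
--             parts.append(f"  {i+2:4}|{lines[i+1][:100]}")
--         snippets.append('\n'.join(parts))
--     n = len(line_numbers)
--     output = f"Found {n} matches"
--     if n > max_matches:
--         output += f" (showing first {max_matches})"
--     output += f" at lines: {', '.join(map(str, line_numbers[:20]))}"
--     if n > 20:
--         output += f", ... and {n - 20} more"
--     output += "\n\n"
--     output += "\n---\n".join(snippets)
--     return line_numbers, output
-- ===== Notes on version B (the rewrite author's own statement) =====
-- stated objective: alternative
-- what changed: B abandons A's line-by-line scan with 'search_string in line' tests entirely: it splits the WHOLE content by the needle once and recovers each match's line index as the running count of newlines in the pieces before it (deduplicating consecutive equal indices), then builds the capped snippets and header from those indices.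
import Mathlib
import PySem

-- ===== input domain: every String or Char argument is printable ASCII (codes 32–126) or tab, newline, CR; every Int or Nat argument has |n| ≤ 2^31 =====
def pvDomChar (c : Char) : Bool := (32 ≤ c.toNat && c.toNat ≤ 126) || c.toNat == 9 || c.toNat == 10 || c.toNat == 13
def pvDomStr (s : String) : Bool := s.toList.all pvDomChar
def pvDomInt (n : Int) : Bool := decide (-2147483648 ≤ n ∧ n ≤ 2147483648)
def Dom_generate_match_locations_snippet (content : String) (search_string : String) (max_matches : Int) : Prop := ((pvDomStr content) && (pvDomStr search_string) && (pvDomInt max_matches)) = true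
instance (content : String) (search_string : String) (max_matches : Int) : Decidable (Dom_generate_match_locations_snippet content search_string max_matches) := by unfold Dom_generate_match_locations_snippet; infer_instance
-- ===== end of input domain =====

-- B replaces A's per-line 'search_string in line' scan by one global split of the content by the
-- needle, recovering match line indices as running newline counts of the pieces (alternative
-- algorithm, same return value; no speed claim).

-- f"{i:4}" for a nonnegative int: right-align in width 4 with spaces (exact on the inputs used here)
def pvPad4 (n : Int) : String :=
  let s := (PySem.Int.toStr n).toList
  String.ofList (List.replicate (4 - s.length) ' ' ++ s)

-- ===== PORT A =====

-- the snippet A builds for matching line (i, line); lines[i-1]/lines[i+1] are guarded in range,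
-- so pyGetD with default "" is exact
def pvSnipA (lines : List String) (i : Int) (line : String) : String :=
  let s1 : List String := if 0 < i then ["  " ++ pvPad4 i ++ "|" ++ PySem.Str.slice (PySem.List.pyGetD lines (i - 1) "") none (some 100)] else []
  let s2 : List String := ["> " ++ pvPad4 (i + 1) ++ "|" ++ PySem.Str.slice line none (some 100)]
  let s3 : List String := if i < (lines.length : Int) - 1 then ["  " ++ pvPad4 (i + 2) ++ "|" ++ PySem.Str.slice (PySem.List.pyGetD lines (i + 1) "") none (some 100)] else []
  PySem.Str.join "\n" (s1 ++ s2 ++ s3)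

-- A's single loop over enumerate(lines), state = (matches, line_numbers)
def pvLoopA (ss : String) (mm : Int) (lines : List String) :
    List (Int × String) → List String × List Int → List String × List Int
  | [], acc => acc
  | (i, line) :: rest, (ms, lns) =>
    if PySem.Str.isIn ss line then
      let lns' := lns ++ [i + 1]
      let ms' := if (ms.length : Int) < mm then ms ++ [pvSnipA lines i line] else ms
      pvLoopA ss mm lines rest (ms', lns')
    else
      pvLoopA ss mm lines rest (ms, lns)

def generate_match_locations_snippet (content : String) (search_string : String) (max_matches : Int) : List Int × String :=
  if content == "" || search_string == "" then ([], "") else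
  let lines := (PySem.Str.split? content "\n").getD []  -- sep ≠ "", so split? = some; getD is exact
  let r := pvLoopA search_string max_matches lines (PySem.List.enumerate lines 0) ([], [])
  let ms := r.1
  let lns := r.2
  if ms = [] then ([], "") else
  let out := "Found " ++ PySem.Int.toStr lns.length ++ " matches"
  let out := if max_matches < (lns.length : Int) then out ++ " (showing first " ++ PySem.Int.toStr max_matches ++ ")" else out
  let out := out ++ " at lines: " ++ PySem.Str.join ", " ((lns.take 20).map PySem.Int.toStr)
  let out := if 20 < lns.length then out ++ ", ... and " ++ PySem.Int.toStr ((lns.length : Int) - 20) ++ " more" else out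
  let out := out ++ "\n\n" ++ PySem.Str.join "\n---\n" ms
  (lns, out)

-- ===== PORT B =====

-- B's snippet for matching line index i; lines[i-1]/lines[i]/lines[i+1] are guarded in range,
-- so pyGetD with default "" is exact
def pvSnipB (lines : List String) (i : Int) : String :=
  let s1 : List String := if 0 < i then ["  " ++ pvPad4 i ++ "|" ++ PySem.Str.slice (PySem.List.pyGetD lines (i - 1) "") none (some 100)] else []
  let s2 : List String := ["> " ++ pvPad4 (i + 1) ++ "|" ++ PySem.Str.slice (PySem.List.pyGetD lines i "") none (some 100)]
  let s3 : List String := if i < (lines.length : Int) - 1 then ["  " ++ pvPad4 (i + 2) ++ "|" ++ PySem.Str.slice (PySem.List.pyGetD lines (i + 1) "") none (some 100)] else []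
  PySem.Str.join "\n" (s1 ++ s2 ++ s3)

-- one step of B's loop over pieces[:-1]: acc += piece.count('\n');
-- 'if not idx or idx[-1] != acc: idx.append(acc)' is exactly 'getLast? ≠ some acc'
def pvStepB (st : List Int × Int) (piece : String) : List Int × Int :=
  let acc := st.2 + (PySem.Str.count piece "\n" : Int)
  (if st.1.getLast? = some acc then st.1 else st.1 ++ [acc], acc)

def generate_match_locations_snippet_alt (content : String) (search_string : String) (max_matches : Int) : List Int × String :=
  if content == "" || search_string == "" then ([], "") else
  if PySem.Str.isIn "\n" search_string then ([], "") else
  let pieces := (PySem.Str.split? content search_string).getD []  -- sep ≠ "", so split? = some; getD is exact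
  let idx := ((PySem.List.slice pieces none (some (-1))).foldl pvStepB ([], 0)).1
  if idx = [] ∨ max_matches ≤ 0 then ([], "") else
  let line_numbers := idx.map (· + 1)
  let lines := (PySem.Str.split? content "\n").getD []  -- sep ≠ "", so split? = some; getD is exact
  let snippets := (PySem.List.slice idx none (some max_matches)).map (pvSnipB lines)
  let out := "Found " ++ PySem.Int.toStr line_numbers.length ++ " matches"
  let out := if max_matches < (line_numbers.length : Int) then out ++ " (showing first " ++ PySem.Int.toStr max_matches ++ ")" else out
  let out := out ++ " at lines: " ++ PySem.Str.join ", " ((line_numbers.take 20).map PySem.Int.toStr)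
  let out := if 20 < line_numbers.length then out ++ ", ... and " ++ PySem.Int.toStr ((line_numbers.length : Int) - 20) ++ " more" else out
  let out := out ++ "\n\n" ++ PySem.Str.join "\n---\n" snippets
  (line_numbers, out)

-- ===== PRECONDITION & SPEC =====
def Spec_generate_match_locations_snippet (content : String) (search_string : String) (max_matches : Int) (out : List Int × String) : Prop := out = generate_match_locations_snippet_alt content search_string max_matches
instance (content : String) (search_string : String) (max_matches : Int) (out : List Int × String) : Decidable (Spec_generate_match_locations_snippet content search_string max_matches out) := by unfold Spec_generate_match_locations_snippet; infer_instance

-- ===== CLAIM (what is proved, stated in full; the proofs are below) =====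
def Claim_equal_generate_match_locations_snippet : Prop := ∀ (content : String) (search_string : String) (max_matches : Int), Dom_generate_match_locations_snippet content search_string max_matches → Spec_generate_match_locations_snippet content search_string max_matches (generate_match_locations_snippet content search_string max_matches)

-- ===== LEMMAS AND PROOFS =====

-- proof-side clean model of PySem.Chars.splitOn (fuel-free); all splitting facts are proved on it
def mySplit (sub : List Char) : List Char → List (List Char)
  | [] => [[]]
  | c :: rest =>
    if sub.isPrefixOf (c :: rest) then
      [] :: mySplit sub (rest.drop (sub.length - 1))
    else
      (mySplit sub rest).modifyHead (c :: ·)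
termination_by l => l.length
decreasing_by
  · simp only [List.length_drop, List.length_cons]; omega
  · simp

lemma mySplit_ne_nil (sub l : List Char) : mySplit sub l ≠ [] := by
  induction l using mySplit.induct (sub := sub) with
  | case1 => simp [mySplit]
  | case2 c rest h ih => simp [mySplit, h]
  | case3 c rest h ih =>
    simp only [mySplit, h, Bool.false_eq_true, if_false]
    cases h' : mySplit sub rest with
    | nil => exact absurd h' ih
    | cons a t => simp [List.modifyHead]

lemma drop_sub_cons (sub : List Char) (hsub : sub ≠ []) (c : Char) (rest : List Char) :
    List.drop sub.length (c :: rest) = List.drop (sub.length - 1) rest := by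
  obtain ⟨k, hk⟩ : ∃ k, sub.length = k + 1 :=
    ⟨sub.length - 1, by have := List.length_pos_of_ne_nil hsub; omega⟩
  rw [hk, List.drop_succ_cons]
  simp

lemma go_eq_mySplit (sub : List Char) (hsub : sub ≠ []) :
    ∀ (fuel : Nat) (l cur : List Char) (acc : List (List Char)), l.length ≤ fuel →
    PySem.Chars.splitOn.go sub fuel l cur acc
      = acc.reverse ++ (mySplit sub l).modifyHead (cur.reverse ++ ·) := by
  intro fuel
  induction fuel with
  | zero =>
    intro l cur acc h
    cases l with
    | nil => simp [PySem.Chars.splitOn.go, mySplit]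
    | cons c rest => simp at h
  | succ f ih =>
    intro l cur acc h
    cases l with
    | nil => simp [PySem.Chars.splitOn.go, mySplit]
    | cons c rest =>
      rw [PySem.Chars.splitOn.go]
      by_cases hp : sub.isPrefixOf (c :: rest)
      · simp only [hp, if_pos]
        rw [drop_sub_cons sub hsub]
        have hfuel : (List.drop (sub.length - 1) rest).length ≤ f := by
          simp only [List.length_drop]
          simp only [List.length_cons] at h
          omega
        rw [ih _ _ _ hfuel]
        simp only [mySplit, hp, if_pos]
        cases h' : mySplit sub (List.drop (sub.length - 1) rest) with
        | nil => exact absurd h' (mySplit_ne_nil _ _)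
        | cons a t => simp [List.modifyHead]
      · simp only [hp, Bool.false_eq_true, if_false]
        rw [ih _ _ _ (by simp only [List.length_cons] at h; omega)]
        simp only [mySplit, hp, Bool.false_eq_true, if_false]
        cases h' : mySplit sub rest with
        | nil => exact absurd h' (mySplit_ne_nil _ _)
        | cons a t => simp [List.modifyHead]

lemma splitOn_eq_mySplit (l sub : List Char) (hsub : sub ≠ []) :
    PySem.Chars.splitOn l sub = mySplit sub l := by
  unfold PySem.Chars.splitOn
  rw [go_eq_mySplit sub hsub _ _ _ _ (by omega)]
  cases h' : mySplit sub l with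
  | nil => exact absurd h' (mySplit_ne_nil _ _)
  | cons a t => simp [List.modifyHead]

lemma countgo_eq_mySplit (sub : List Char) (hsub : sub ≠ []) :
    ∀ (fuel : Nat) (l : List Char) (acc : Nat), l.length ≤ fuel →
    PySem.Chars.count.go sub fuel l acc = acc + ((mySplit sub l).length - 1) := by
  intro fuel
  induction fuel with
  | zero =>
    intro l acc h
    cases l with
    | nil => simp [PySem.Chars.count.go, mySplit]
    | cons c rest => simp at h
  | succ f ih =>
    intro l acc h
    cases l with
    | nil => simp [PySem.Chars.count.go, mySplit]
    | cons c rest =>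
      rw [PySem.Chars.count.go]
      by_cases hp : sub.isPrefixOf (c :: rest)
      · simp only [hp, if_pos]
        rw [drop_sub_cons sub hsub]
        have hfuel : (List.drop (sub.length - 1) rest).length ≤ f := by
          simp only [List.length_drop]
          simp only [List.length_cons] at h
          omega
        rw [ih _ _ hfuel]
        simp only [mySplit, hp, if_pos]
        have hlen : 1 ≤ (mySplit sub (List.drop (sub.length - 1) rest)).length :=
          List.length_pos_of_ne_nil (mySplit_ne_nil _ _)
        simp only [List.length_cons]
        omega
      · simp only [hp, Bool.false_eq_true, if_false]
        rw [ih _ _ (by simp only [List.length_cons] at h; omega)]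
        simp only [mySplit, hp, Bool.false_eq_true, if_false, List.length_modifyHead]

lemma count_eq_mySplit (l sub : List Char) (hsub : sub ≠ []) :
    PySem.Chars.count l sub = (mySplit sub l).length - 1 := by
  unfold PySem.Chars.count
  rw [if_neg (by simpa [List.isEmpty_iff] using hsub)]
  rw [countgo_eq_mySplit sub hsub _ _ _ (by omega)]
  omega

-- a needle without '\n' is a prefix of l ++ '\n' :: r iff it is a prefix of l
lemma prefix_append_nl (sub : List Char) (hnl : '\n' ∉ sub) :
    ∀ (l r : List Char), (sub <+: l ++ '\n' :: r ↔ sub <+: l) := by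
  induction sub with
  | nil => intro l r; simp
  | cons s ss ih =>
    intro l r
    cases l with
    | nil =>
      simp only [List.nil_append]
      constructor
      · intro hp
        rcases List.cons_prefix_cons.mp hp with ⟨rfl, _⟩
        exact absurd (List.mem_cons_self) hnl
      · intro hp; exact absurd hp (by simp)
    | cons c l' =>
      have hnl' : '\n' ∉ ss := fun hm => hnl (List.mem_cons_of_mem _ hm)
      simp only [List.cons_append, List.cons_prefix_cons]
      constructor
      · rintro ⟨rfl, hp⟩
        exact ⟨rfl, (ih hnl' l' r).mp hp⟩
      · rintro ⟨rfl, hp⟩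
        exact ⟨rfl, (ih hnl' l' r).mpr hp⟩

lemma mem_of_mem_mySplit (sub l : List Char) :
    ∀ p ∈ mySplit sub l, ∀ c ∈ p, c ∈ l := by
  induction l using mySplit.induct (sub := sub) with
  | case1 => intro p hp; simp [mySplit] at hp; simp [hp]
  | case2 c rest h ih =>
    intro p hp d hd
    simp only [mySplit, h, if_pos, List.mem_cons] at hp
    rcases hp with rfl | hp
    · simp at hd
    · exact List.mem_cons_of_mem _ (List.mem_of_mem_drop (ih p hp d hd))
  | case3 c rest h ih =>
    intro p hp d hd
    simp only [mySplit, h, Bool.false_eq_true, if_false] at hp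
    cases h' : mySplit sub rest with
    | nil => exact absurd h' (mySplit_ne_nil _ _)
    | cons a t =>
      rw [h'] at hp
      simp only [List.modifyHead, List.mem_cons] at hp
      rcases hp with rfl | hp
      · rcases List.mem_cons.mp hd with rfl | hd'
        · exact List.mem_cons_self
        · exact List.mem_cons_of_mem _ (ih a (by rw [h']; exact List.mem_cons_self) d hd')
      · exact List.mem_cons_of_mem _ (ih p (by rw [h']; exact List.mem_cons_of_mem _ hp) d hd)

lemma two_le_mySplit_iff (sub l : List Char) (hsub : sub ≠ []) :
    2 ≤ (mySplit sub l).length ↔ sub <:+: l := by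
  induction l using mySplit.induct (sub := sub) with
  | case1 =>
    simp only [mySplit, List.length_cons, List.length_nil]
    constructor
    · omega
    · intro h; rw [List.infix_nil] at h; exact absurd h hsub
  | case2 c rest h ih =>
    simp only [mySplit, h, if_pos, List.length_cons]
    have := List.length_pos_of_ne_nil (mySplit_ne_nil sub (List.drop (sub.length - 1) rest))
    constructor
    · intro _; exact (List.isPrefixOf_iff_prefix.mp h).isInfix
    · intro _; omega
  | case3 c rest h ih =>
    simp only [mySplit, h, Bool.false_eq_true, if_false, List.length_modifyHead]
    rw [ih, List.infix_cons_iff]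
    have : ¬ sub <+: c :: rest := fun hp => h (List.isPrefixOf_iff_prefix.mpr hp)
    tauto

-- the global split of l ++ '\n' :: r glues l's last piece, the newline and r's first piece
lemma mySplit_glue (sub : List Char) (hsub : sub ≠ []) (hnl : '\n' ∉ sub) :
    ∀ (l r : List Char),
    mySplit sub (l ++ '\n' :: r)
      = (mySplit sub l).dropLast
        ++ ((mySplit sub l).getLastD [] ++ '\n' :: (mySplit sub r).headD []) :: (mySplit sub r).tail := by
  intro l
  induction l using mySplit.induct (sub := sub) with
  | case1 =>
    intro r
    have hp : ¬ sub.isPrefixOf ('\n' :: r) = true := by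
      intro hpre
      have hpre' := List.isPrefixOf_iff_prefix.mp hpre
      cases sub with
      | nil => exact hsub rfl
      | cons s ss =>
        rcases List.cons_prefix_cons.mp hpre' with ⟨rfl, _⟩
        exact hnl List.mem_cons_self
    simp only [List.nil_append]
    conv_lhs => rw [mySplit]
    rw [if_neg hp]
    cases h' : mySplit sub r with
    | nil => exact absurd h' (mySplit_ne_nil _ _)
    | cons a t => simp [mySplit, List.modifyHead]
  | case2 c rest h ih =>
    intro r
    have hpfx : sub <+: c :: rest := List.isPrefixOf_iff_prefix.mp h
    have hp2 : sub.isPrefixOf (c :: (rest ++ '\n' :: r)) = true := by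
      rw [List.isPrefixOf_iff_prefix]
      exact (prefix_append_nl sub hnl (c :: rest) r).mpr hpfx
    have hle : sub.length - 1 ≤ rest.length := by
      have := hpfx.length_le
      simp only [List.length_cons] at this
      omega
    have hdrop : List.drop (sub.length - 1) (rest ++ '\n' :: r)
        = List.drop (sub.length - 1) rest ++ '\n' :: r := List.drop_append_of_le_length hle
    conv_lhs => rw [List.cons_append, mySplit]
    rw [if_pos hp2, hdrop, ih r]
    conv_rhs => rw [mySplit]
    rw [if_pos h]
    cases hX : mySplit sub (List.drop (sub.length - 1) rest) with
    | nil => exact absurd hX (mySplit_ne_nil _ _)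
    | cons a t => simp [List.getLastD]
  | case3 c rest h ih =>
    intro r
    have hp2 : ¬ sub.isPrefixOf (c :: (rest ++ '\n' :: r)) = true := by
      intro hpre
      have hpre' : sub <+: (c :: rest) ++ '\n' :: r := by
        simpa using List.isPrefixOf_iff_prefix.mp hpre
      exact h (List.isPrefixOf_iff_prefix.mpr ((prefix_append_nl sub hnl (c :: rest) r).mp hpre'))
    conv_lhs => rw [List.cons_append, mySplit]
    rw [if_neg hp2, ih r]
    conv_rhs => rw [mySplit]
    rw [if_neg h]
    cases hY : mySplit sub rest with
    | nil => exact absurd hY (mySplit_ne_nil _ _)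
    | cons y ys =>
      cases ys with
      | nil => simp [List.modifyHead, List.getLastD]
      | cons y2 ys2 => simp [List.modifyHead, List.getLastD, List.dropLast]

-- join of the line decomposition
def joinNl : List (List Char) → List Char
  | [] => []
  | [l] => l
  | l :: L => l ++ '\n' :: joinNl L

lemma joinNl_mySplit_nl (cs : List Char) : joinNl (mySplit ['\n'] cs) = cs := by
  induction cs using mySplit.induct (sub := ['\n']) with
  | case1 => simp [mySplit, joinNl]
  | case2 c rest h ih =>
    obtain ⟨rfl, -⟩ := List.cons_prefix_cons.mp (List.isPrefixOf_iff_prefix.mp h)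
    simp only [mySplit, h, if_pos, List.length_cons, List.length_nil, Nat.zero_add,
      Nat.sub_self, List.drop_zero] at *
    cases h' : mySplit ['\n'] rest with
    | nil => exact absurd h' (mySplit_ne_nil _ _)
    | cons a t =>
      rw [h'] at ih
      simp [joinNl, ih]
  | case3 c rest h ih =>
    simp only [mySplit, h, Bool.false_eq_true, if_false]
    cases h' : mySplit ['\n'] rest with
    | nil => exact absurd h' (mySplit_ne_nil _ _)
    | cons a t =>
      rw [h'] at ih
      cases t with
      | nil => simpa [List.modifyHead, joinNl] using ih
      | cons b u =>
        simp only [joinNl, List.modifyHead, List.cons_append] at ih ⊢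
        rw [ih]

lemma nl_notin_mySplit_nl (cs : List Char) : ∀ p ∈ mySplit ['\n'] cs, '\n' ∉ p := by
  induction cs using mySplit.induct (sub := ['\n']) with
  | case1 => intro p hp; simp [mySplit] at hp; simp [hp]
  | case2 c rest h ih =>
    intro p hp
    simp only [mySplit, h, if_pos, List.mem_cons] at hp
    rcases hp with rfl | hp
    · simp
    · exact ih p (by simpa using hp)
  | case3 c rest h ih =>
    intro p hp
    have hc : c ≠ '\n' := by
      intro rfl'
      exact h (List.isPrefixOf_iff_prefix.mpr (by rw [rfl']; exact ⟨rest, rfl⟩))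
    simp only [mySplit, h, Bool.false_eq_true, if_false] at hp
    cases h' : mySplit ['\n'] rest with
    | nil => exact absurd h' (mySplit_ne_nil _ _)
    | cons a t =>
      rw [h'] at hp
      simp only [List.modifyHead, List.mem_cons] at hp
      rcases hp with rfl | hp
      · intro hm
        rcases List.mem_cons.mp hm with heq | hm'
        · exact hc heq.symm
        · exact ih a (by rw [h']; exact List.mem_cons_self) hm'
      · exact ih p (by rw [h']; exact List.mem_cons_of_mem _ hp)

lemma length_mySplit_nl (cs : List Char) : (mySplit ['\n'] cs).length = cs.count '\n' + 1 := by
  induction cs using mySplit.induct (sub := ['\n']) with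
  | case1 => simp [mySplit]
  | case2 c rest h ih =>
    obtain ⟨rfl, -⟩ := List.cons_prefix_cons.mp (List.isPrefixOf_iff_prefix.mp h)
    simp only [mySplit, h, if_pos, List.length_cons, List.length_nil, Nat.zero_add,
      Nat.sub_self, List.drop_zero] at *
    rw [ih]
    simp
  | case3 c rest h ih =>
    have hc : c ≠ '\n' := by
      intro rfl'
      exact h (List.isPrefixOf_iff_prefix.mpr (by rw [rfl']; exact ⟨rest, rfl⟩))
    simp only [mySplit, h, Bool.false_eq_true, if_false, List.length_modifyHead]
    rw [ih]
    simp [hc]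

def addHead1 : List Nat → List Nat
  | [] => []
  | n :: t => (n + 1) :: t

-- the per-piece newline counts of the global split, expressed line by line
def pvShape (sub : List Char) : List (List Char) → List Nat
  | [] => []
  | l :: L => List.replicate ((mySplit sub l).length - 1) 0 ++ addHead1 (pvShape sub L)

-- substring count by a single '\n' is the plain character count
lemma countNl_eq (x : List Char) : PySem.Chars.count x ['\n'] = x.count '\n' := by
  rw [count_eq_mySplit _ _ (by simp), length_mySplit_nl]
  omega

lemma getLastD_mem {α : Type} (l : List α) (d : α) (h : l ≠ []) : l.getLastD d ∈ l := by
  induction l generalizing d with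
  | nil => exact absurd rfl h
  | cons a t ih =>
    cases t with
    | nil => simp [List.getLastD]
    | cons b u => exact List.mem_cons_of_mem _ (ih a (by simp))

-- the pieces of a newline-free line carry newline count 0
lemma lineCounts (sub l : List Char) (_hsub : sub ≠ []) (hl : '\n' ∉ l) :
    ((mySplit sub l).dropLast).map (fun p => PySem.Chars.count p ['\n'])
      = List.replicate ((mySplit sub l).length - 1) 0 := by
  rw [List.eq_replicate_iff]
  constructor
  · simp
  · intro b hb
    simp only [List.mem_map] at hb
    obtain ⟨p, hp, rfl⟩ := hb
    have hp' : p ∈ mySplit sub l := (List.dropLast_sublist _).subset hp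
    have : '\n' ∉ p := fun hm => hl (mem_of_mem_mySplit sub l p hp' _ hm)
    rw [countNl_eq, List.count_eq_zero.mpr this]

lemma ns_shape (sub : List Char) (hsub : sub ≠ []) (hnl : '\n' ∉ sub) :
    ∀ (L : List (List Char)), (∀ l ∈ L, '\n' ∉ l) →
    ((mySplit sub (joinNl L)).dropLast).map (fun p => PySem.Chars.count p ['\n']) = pvShape sub L := by
  intro L
  induction L with
  | nil => intro _; simp [joinNl, mySplit, pvShape]
  | cons l L' ih =>
    intro hL
    have hl : '\n' ∉ l := hL l List.mem_cons_self
    cases L' with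
    | nil =>
      simp only [joinNl, pvShape, addHead1, List.append_nil]
      exact lineCounts sub l hsub hl
    | cons l2 L'' =>
      have hjoin : joinNl (l :: l2 :: L'') = l ++ '\n' :: joinNl (l2 :: L'') := rfl
      rw [hjoin, mySplit_glue sub hsub hnl]
      have ih' := ih (fun x hx => hL x (List.mem_cons_of_mem _ hx))
      rw [List.dropLast_append_of_ne_nil (by simp)]
      cases hq : mySplit sub (joinNl (l2 :: L'')) with
      | nil => exact absurd hq (mySplit_ne_nil _ _)
      | cons q0 qt =>
        cases qt with
        | nil =>
          -- only one piece on the right: it is the overall last piece, nothing is appended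
          have hd : ∀ (x : List Char), ([x] : List (List Char)).dropLast = [] := fun _ => rfl
          simp only [List.tail_cons]
          rw [hd, List.append_nil, lineCounts sub l hsub hl]
          have hshape : pvShape sub (l2 :: L'') = [] := by
            rw [← ih', hq]; simp
          conv_rhs => rw [pvShape, hshape]
          simp [addHead1]
        | cons q1 qrest =>
          have hlast : '\n' ∉ (mySplit sub l).getLastD [] := fun hm =>
            hl (mem_of_mem_mySplit sub l _ (getLastD_mem _ _ (mySplit_ne_nil _ _)) _ hm)
          have hglue : PySem.Chars.count ((mySplit sub l).getLastD [] ++ '\n' :: q0) ['\n']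
              = PySem.Chars.count q0 ['\n'] + 1 := by
            rw [countNl_eq, countNl_eq, List.count_append, List.count_cons]
            rw [List.count_eq_zero.mpr hlast]
            simp
          have hshape : pvShape sub (l2 :: L'')
              = PySem.Chars.count q0 ['\n'] :: ((q1 :: qrest).dropLast).map (fun p => PySem.Chars.count p ['\n']) := by
            rw [← ih', hq]
            simp [List.dropLast]
          simp only [List.tail_cons, List.headD_cons, List.dropLast_cons₂, List.map_append,
            List.map_cons]
          rw [lineCounts sub l hsub hl, hglue]
          conv_rhs => rw [pvShape, hshape]
          simp [addHead1]

-- Nat-level version of B's loop step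
def stepNs (st : List Int × Int) (n : Nat) : List Int × Int :=
  (if st.1.getLast? = some (st.2 + (n : Int)) then st.1 else st.1 ++ [st.2 + (n : Int)], st.2 + (n : Int))

lemma foldl_stepNs_replicate (k : Nat) (idx : List Int) (a : Int) :
    (List.replicate k 0).foldl stepNs (idx, a)
      = (if k = 0 ∨ idx.getLast? = some a then idx else idx ++ [a], a) := by
  induction k generalizing idx with
  | zero => simp
  | succ k ih =>
    rw [List.replicate_succ, List.foldl_cons]
    have hstep : stepNs (idx, a) 0
        = (if idx.getLast? = some a then idx else idx ++ [a], a) := by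
      simp [stepNs]
    rw [hstep]
    by_cases hl : idx.getLast? = some a
    · rw [if_pos hl, ih]
      simp [hl]
    · rw [if_neg hl, ih]
      simp [hl]

lemma foldl_stepNs_addHead1 (ns : List Nat) (idx : List Int) (a : Int) :
    ((addHead1 ns).foldl stepNs (idx, a)).1 = (ns.foldl stepNs (idx, a + 1)).1 := by
  cases ns with
  | nil => simp [addHead1]
  | cons n t =>
    have h1 : stepNs (idx, a) (n + 1) = stepNs (idx, a + 1) n := by
      simp only [stepNs]
      rw [show a + ((n + 1 : Nat) : Int) = a + 1 + (n : Int) by push_cast; ring]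
    simp only [addHead1, List.foldl_cons, h1]

-- which line indices B's dedup-prefix-sum loop produces
def matchNums (sub : List Char) : List (List Char) → Int → List Int
  | [], _ => []
  | l :: L, a => (if PySem.Chars.isIn sub l then [a] else []) ++ matchNums sub L (a + 1)

lemma foldl_stepNs_shape (sub : List Char) (hsub : sub ≠ []) :
    ∀ (L : List (List Char)) (idx : List Int) (a : Int), (∀ x ∈ idx, x < a) →
    ((pvShape sub L).foldl stepNs (idx, a)).1 = idx ++ matchNums sub L a := by
  intro L
  induction L with
  | nil => intro idx a _; simp [pvShape, matchNums]
  | cons l L' ih =>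
    intro idx a hinv
    have hnotlast : ¬ idx.getLast? = some a := by
      intro hl
      exact absurd (hinv a (List.mem_of_getLast? hl)) (by omega)
    rw [pvShape, List.foldl_append, foldl_stepNs_replicate]
    have hiff : (mySplit sub l).length - 1 = 0 ↔ ¬ PySem.Chars.isIn sub l := by
      rw [PySem.Chars.isIn_iff_infix, ← two_le_mySplit_iff sub l hsub]
      have := List.length_pos_of_ne_nil (mySplit_ne_nil sub l)
      omega
    by_cases hm : PySem.Chars.isIn sub l = true
    · rw [if_neg (by rw [not_or]; exact ⟨fun h => (hiff.mp h) hm, hnotlast⟩)]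
      rw [foldl_stepNs_addHead1, ih (idx ++ [a]) (a + 1) ?_]
      · simp [matchNums, hm]
      · intro x hx
        rcases List.mem_append.mp hx with hx | hx
        · exact lt_trans (hinv x hx) (by omega)
        · simp only [List.mem_singleton] at hx; omega
    · rw [if_pos (Or.inl (hiff.mpr (by simpa using hm)))]
      rw [foldl_stepNs_addHead1, ih idx (a + 1) (fun x hx => lt_trans (hinv x hx) (by omega))]
      simp [matchNums, hm]

-- A's filtered enumerate produces the same indices
lemma matchNums_eq_filter (ss : String) :
    ∀ (lines : List String) (a : Int),
    ((PySem.List.enumerate lines a).filter (fun p => PySem.Str.isIn ss p.2)).map Prod.fst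
      = matchNums ss.toList (lines.map String.toList) a := by
  intro lines
  induction lines with
  | nil => intro a; simp [PySem.List.enumerate, matchNums]
  | cons x xs ih =>
    intro a
    simp only [PySem.List.enumerate, List.map_cons, matchNums]
    by_cases hm : PySem.Str.isIn ss x = true
    · rw [List.filter_cons_of_pos (by simpa using hm)]
      rw [PySem.Str.isIn_eq] at hm
      simp only [hm, if_pos, List.map_cons, ih (a + 1)]
      rfl
    · rw [List.filter_cons_of_neg (by simpa using hm)]
      rw [PySem.Str.isIn_eq] at hm
      simp only [hm, Bool.false_eq_true, if_false, ih (a + 1)]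
      rfl

lemma slice_neg_one {α : Type} (xs : List α) :
    PySem.List.slice xs none (some (-1)) = xs.dropLast := by
  simp only [PySem.List.slice, PySem.List.clampIdx, List.dropLast_eq_take]
  split_ifs with h1 h2 <;> simp <;> omega

lemma singleton_infix_iff (c : Char) (l : List Char) : [c] <:+: l ↔ c ∈ l := by
  constructor
  · rintro ⟨s, t, rfl⟩; simp
  · intro h
    obtain ⟨s, t, rfl⟩ := List.append_of_mem h
    exact ⟨s, t, by simp⟩

-- characterisation of A's fused loop: appended line numbers are all matches, appended
-- snippets are the first (mm - current length) matches
lemma pvLoopA_eq (ss : String) (mm : Int) (lines : List String) :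
    ∀ (ps : List (Int × String)) (ms : List String) (lns : List Int),
    pvLoopA ss mm lines ps (ms, lns) =
      (ms ++ (((ps.filter (fun p => PySem.Str.isIn ss p.2)).take (mm - ms.length).toNat).map
          (fun p => pvSnipA lines p.1 p.2)),
       lns ++ (ps.filter (fun p => PySem.Str.isIn ss p.2)).map (fun p => p.1 + 1)) := by
  intro ps
  induction ps with
  | nil => intro ms lns; simp [pvLoopA]
  | cons p rest ih =>
    intro ms lns
    obtain ⟨i, line⟩ := p
    by_cases h : PySem.Str.isIn ss line
    · simp only [pvLoopA, h, if_pos, List.filter_cons_of_pos]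
      by_cases hlt : (ms.length : Int) < mm
      · rw [if_pos hlt, ih]
        have h1 : (mm - (ms.length : Int)).toNat = (mm - ((ms ++ [pvSnipA lines i line]).length : Int)).toNat + 1 := by
          simp; omega
        rw [h1, List.take_succ_cons]
        simp
      · rw [if_neg hlt, ih]
        have h0 : (mm - (ms.length : Int)).toNat = 0 := by omega
        rw [h0]
        simp
    · rw [List.filter_cons_of_neg (by simpa using h)]
      simp only [pvLoopA, h, Bool.false_eq_true, if_false]
      exact ih ms lns

-- on pairs coming from enumerate, A's snippet (using the carried line) equals B's (re-reading lines[i])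
lemma pvSnip_eq (lines : List String) (p : Int × String)
    (hp : p ∈ PySem.List.enumerate lines 0) :
    pvSnipA lines p.1 p.2 = pvSnipB lines p.1 := by
  rw [PySem.List.mem_enumerate_iff] at hp
  obtain ⟨k, hk, rfl⟩ := hp
  simp only [pvSnipA, pvSnipB]
  have : PySem.List.pyGetD lines ((0 : Int) + k) "" = lines[k] := by
    have : ((0 : Int) + k) = ((k : Nat) : Int) := by omega
    rw [this, PySem.List.pyGetD_natCast]
    simp [hk]
  rw [this]

-- ===== VERDICT (by name: the statement is the Claim_ definition above) =====
theorem generate_match_locations_snippet_spec : Claim_equal_generate_match_locations_snippet := by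
  intro content search_string max_matches _
  unfold Spec_generate_match_locations_snippet
  unfold generate_match_locations_snippet generate_match_locations_snippet_alt
  by_cases h0 : (content == "" || search_string == "") = true
  · simp [h0]
  · simp only [h0, Bool.false_eq_true, if_false]
    have hss : search_string ≠ "" := by
      intro h
      exact h0 (by simp [h])
    have hssl : search_string.toList ≠ [] := fun h => hss (String.toList_eq_nil_iff.mp h)
    have hnlchar : ("\n" : String).toList = ['\n'] := rfl
    -- the line decomposition
    obtain ⟨linesS, hlines, hmapL⟩ :
        ∃ ls, PySem.Str.split? content "\n" = some ls
          ∧ ls.map String.toList = mySplit ['\n'] content.toList := by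
      have h1 := PySem.Str.split?_map content "\n"
      rw [hnlchar] at h1
      unfold PySem.Chars.split? at h1
      rw [if_neg (by simp)] at h1
      rw [splitOn_eq_mySplit _ _ (by simp)] at h1
      obtain ⟨ls, hls, hmap⟩ := Option.map_eq_some_iff.mp h1
      exact ⟨ls, hls, hmap⟩
    -- the needle decomposition
    obtain ⟨piecesS, hpieces, hmapP⟩ :
        ∃ ps, PySem.Str.split? content search_string = some ps
          ∧ ps.map String.toList = mySplit search_string.toList content.toList := by
      have h1 := PySem.Str.split?_map content search_string
      unfold PySem.Chars.split? at h1
      rw [if_neg (by simpa [List.isEmpty_iff] using hssl)] at h1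
      rw [splitOn_eq_mySplit _ _ hssl] at h1
      obtain ⟨ps, hps, hmap⟩ := Option.map_eq_some_iff.mp h1
      exact ⟨ps, hps, hmap⟩
    have hLfree := nl_notin_mySplit_nl content.toList
    have hjoin := joinNl_mySplit_nl content.toList
    rw [pvLoopA_eq]
    simp only [List.nil_append, List.length_nil, Nat.cast_zero, Int.sub_zero]
    rw [hlines, hpieces]
    simp only [Option.getD_some]
    set fps := (PySem.List.enumerate linesS 0).filter (fun p => PySem.Str.isIn search_string p.2) with hf
    by_cases hin : PySem.Str.isIn "\n" search_string = true
    · -- a needle containing a newline matches no line: both sides return ([], "")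
      have hmem : '\n' ∈ search_string.toList := by
        rw [PySem.Str.isIn_eq, hnlchar] at hin
        exact (singleton_infix_iff _ _).mp ((PySem.Chars.isIn_iff_infix _ _).mp hin)
      have hfil : fps = [] := by
        rw [hf, List.filter_eq_nil_iff]
        intro p hp hisin
        have hinf := (PySem.Str.isIn_iff_infix _ _).mp hisin
        have hmemline : '\n' ∈ p.2.toList := hinf.subset hmem
        have hpl : p.2.toList ∈ mySplit ['\n'] content.toList := by
          rw [PySem.List.mem_enumerate_iff] at hp
          obtain ⟨k, hk, rfl⟩ := hp
          rw [← hmapL]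
          exact List.mem_map_of_mem (by simp)
        exact hLfree _ hpl hmemline
      rw [hfil, if_pos hin]
      simp
    · have hnlss : '\n' ∉ search_string.toList := by
        intro hmem
        apply hin
        rw [PySem.Str.isIn_eq, hnlchar, PySem.Chars.isIn_iff_infix]
        exact (singleton_infix_iff _ _).mpr hmem
      simp only [hin, Bool.false_eq_true, if_false]
      -- B's index list equals A's filtered indices
      have hidx : ((PySem.List.slice piecesS none (some (-1))).foldl pvStepB ([], 0)).1
          = fps.map Prod.fst := by
        rw [slice_neg_one]
        have hfoldB : piecesS.dropLast.foldl pvStepB (([] : List Int), (0 : Int))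
            = (piecesS.dropLast.map (fun p => PySem.Str.count p "\n")).foldl stepNs ([], 0) := by
          rw [List.foldl_map]
          rfl
        rw [hfoldB]
        have hcounts : piecesS.dropLast.map (fun p => PySem.Str.count p "\n")
            = pvShape search_string.toList (linesS.map String.toList) := by
          have e1 : ∀ p : String, PySem.Str.count p "\n" = PySem.Chars.count p.toList ['\n'] := by
            intro p
            rw [PySem.Str.count_eq, hnlchar]
          simp only [e1]
          have e2 : piecesS.dropLast.map (fun p => PySem.Chars.count p.toList ['\n'])
              = ((piecesS.map String.toList).dropLast).map (fun p => PySem.Chars.count p ['\n']) := by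
            simp only [List.dropLast_eq_take, List.map_take, List.map_map, List.length_map]
            rfl
          have hfree2 : ∀ l ∈ linesS.map String.toList, '\n' ∉ l := by
            rw [hmapL]; exact hLfree
          have hns := ns_shape search_string.toList hssl hnlss (linesS.map String.toList) hfree2
          have hjoin2 : joinNl (linesS.map String.toList) = content.toList := by
            rw [hmapL]; exact hjoin
          rw [hjoin2] at hns
          rw [e2, hmapP]
          exact hns
        rw [hcounts, foldl_stepNs_shape _ hssl _ _ _ (by simp)]
        rw [← matchNums_eq_filter]
        simp [hf]
      rw [hidx]
      by_cases hfe : fps = []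
      · rw [hfe]
        simp
      · have hfl : 1 ≤ fps.length := List.length_pos_of_ne_nil hfe
        by_cases hmm : max_matches ≤ 0
        · rw [if_pos (Or.inr hmm)]
          have : max_matches.toNat = 0 := by omega
          simp [this]
        · rw [if_neg (show ¬(List.map Prod.fst fps = [] ∨ max_matches ≤ 0) by
            rw [not_or]
            exact ⟨by simpa using hfe, hmm⟩)]
          have htake : (fps.take max_matches.toNat).map (fun p => pvSnipA linesS p.1 p.2) ≠ [] := by
            simp only [ne_eq, List.map_eq_nil_iff, List.take_eq_nil_iff, not_or]
            exact ⟨by omega, hfe⟩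
          rw [if_neg htake]
          -- snippets agree
          have hsnips : (fps.take max_matches.toNat).map (fun p => pvSnipA linesS p.1 p.2)
              = (PySem.List.slice (fps.map Prod.fst) none (some max_matches)).map (pvSnipB linesS) := by
            rw [PySem.List.slice_to _ (by omega), ← List.map_take, List.map_map]
            refine List.map_congr_left ?_
            intro p hpm
            have hmem : p ∈ PySem.List.enumerate linesS 0 :=
              (List.mem_filter.mp (List.mem_of_mem_take hpm)).1
            exact pvSnip_eq linesS p hmem
          -- line numbers agree
          have hln : fps.map (fun p => p.1 + 1) = (fps.map Prod.fst).map (· + 1) := by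
            rw [List.map_map]
            rfl
          rw [hsnips, hln]
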